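-- pv_equiv track=rewrite | github.com/ShambhaviRoy/Data-Structures-and-Algorithms | Cracking-the-Coding-Interview-Book-Questions/Bit Manipulation/5.3_Flip_bit_to_win.py | flip_bit
-- ===== SOURCE A (Python) =====
-- def flip_bit(num):
--     if (~num == 0):
--         return (1 << 8)-1
--
--     curr1slen = 0
--     prev1slen = 0
--     max1slen = 1
--
--     while(num != 0):
--         if((num & 1) == 1):
--             curr1slen += 1
--         elif ((num & 1) == 0):
--             prev1slen = 0 if (num & 2) == 0 else curr1slen
--             curr1slen = 0
--
--         max1slen = max(prev1slen + curr1slen + 1, max1slen)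
--         num = num >> 1
--
--     return max1slen
-- ===== SOURCE B (Python) =====
-- # Two-phase re-implementation: build the list of alternating bit-runs, then
-- # combine 1-runs (joining across single-zero gaps) in a second pass.
--
-- def _runs(n):
--     # LSB-first list of (bit, run_length) for the binary digits of n.
--     if n == 0:
--         return []
--     b = n & 1
--     l = 0
--     while n != 0 and (n & 1) == b:
--         l += 1
--         n >>= 1
--     return [(b, l)] + _runs(n)
--
-- def _best(runs):
--     # Longest 1-run obtainable with one flip, from the run table.
--     if not runs:
--         return 1
--     (b, l) = runs[0]
--     rest = runs[1:]
--     best = _best(rest)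
--     if b == 1:
--         best = max(best, l + 1)
--         if len(rest) >= 2 and rest[0] == (0, 1) and rest[1][0] == 1:
--             best = max(best, l + rest[1][1] + 1)
--     return best
--
-- def flip_bit(num):
--     if ~num == 0:
--         return (1 << 8) - 1
--     return _best(_runs(num))
-- ===== Notes on version B (the rewrite author's own statement) =====
-- stated objective: alternative
-- what changed: A's fused single bit-scan carrying (curr,prev,max) state with a one-bit lookahead is replaced by a two-phase algorithm: first build the list of alternating bit-run lengths, then a second pass combines each 1-run (length+1) and joins adjacent 1-runs across a single-zero gap.
import Mathlib
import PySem

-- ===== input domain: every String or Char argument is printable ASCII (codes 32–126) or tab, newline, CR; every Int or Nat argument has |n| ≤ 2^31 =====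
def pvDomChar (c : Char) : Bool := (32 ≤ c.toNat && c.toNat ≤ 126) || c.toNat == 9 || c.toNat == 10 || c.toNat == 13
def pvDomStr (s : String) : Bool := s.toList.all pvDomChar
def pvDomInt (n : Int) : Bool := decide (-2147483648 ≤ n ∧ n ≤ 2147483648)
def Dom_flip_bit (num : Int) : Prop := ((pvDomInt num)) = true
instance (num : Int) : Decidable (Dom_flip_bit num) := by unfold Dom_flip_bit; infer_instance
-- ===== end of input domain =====

-- B replaces A's fused single scan by a two-phase algorithm (build the bit-run table,
-- then combine adjacent 1-runs across single-zero gaps); same cost, different structure.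
-- Python `n & k` is ported as Int.land (exact), `>>` as `>>>` (Mathlib's arithmetic
-- right shift on ℤ, exact on the admitted inputs), `~` as `~~~`.
-- Both loops run `while num != 0`; the fuel arguments only make the recursions total
-- in Lean and are never exhausted on inputs satisfying Pre_flip_bit.

-- ===== PORT A =====
def flip_bit_go (fuel : Nat) (num curr1slen prev1slen max1slen : Int) : Int :=
  match fuel with
  | 0 => max1slen
  | fuel + 1 =>
    if num = 0 then max1slen
    else
      let cp : Int × Int :=
        if Int.land num 1 = 1 then (curr1slen + 1, prev1slen)
        else (0, if Int.land num 2 = 0 then 0 else curr1slen)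
      flip_bit_go fuel (num >>> (1:Int)) cp.1 cp.2 (max (cp.2 + cp.1 + 1) max1slen)

def flip_bit (num : Int) : Int :=
  if ~~~num = 0 then (1 <<< 8 : Int) - 1
  else flip_bit_go (num.toNat + 1) num 0 0 1

-- ===== PORT B =====
-- inner `while n != 0 and (n & 1) == b` of _runs
def runChunk (fuel : Nat) (n b l : Int) : Int × Int :=
  match fuel with
  | 0 => (l, n)
  | fuel + 1 =>
    if n ≠ 0 ∧ Int.land n 1 = b then runChunk fuel (n >>> (1:Int)) b (l + 1)
    else (l, n)

-- recursive _runs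
def buildRuns (fuel : Nat) (n : Int) : List (Int × Int) :=
  match fuel with
  | 0 => []
  | fuel + 1 =>
    if n = 0 then []
    else
      let b := Int.land n 1
      let ln := runChunk (n.toNat + 1) n b 0
      (b, ln.1) :: buildRuns fuel ln.2

-- recursive _best
def bestRuns : List (Int × Int) → Int
  | [] => 1
  | (b, l) :: rest =>
    let best := bestRuns rest
    if b = 1 then
      let best := max best (l + 1)
      match rest with
      | (b1, l1) :: (b2, l2) :: _ =>
        if b1 = 0 ∧ l1 = 1 ∧ b2 = 1 then max best (l + l2 + 1) else best
      | _ => best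
    else best

def flip_bit_alt (num : Int) : Int :=
  if ~~~num = 0 then (1 <<< 8 : Int) - 1
  else bestRuns (buildRuns (num.toNat + 1) num)

-- ===== PRECONDITION & SPEC =====
-- Pre_ excludes num ≤ -2, on which Python A's `while num != 0` never terminates
-- (num >> 1 stays negative), so A returns no value there; B diverges there too.
def Pre_flip_bit (num : Int) : Prop := 0 ≤ num ∨ num = -1
instance (num : Int) : Decidable (Pre_flip_bit num) := by unfold Pre_flip_bit; infer_instance
def pvWitness_flip_bit : Int := 11

def Spec_flip_bit (num : Int) (out : Int) : Prop := out = flip_bit_alt num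
instance (num : Int) (out : Int) : Decidable (Spec_flip_bit num out) := by unfold Spec_flip_bit; infer_instance

-- ===== CLAIM (what is proved, stated in full; the proofs are below) =====
def Claim_equal_flip_bit : Prop := ∀ (num : Int), Dom_flip_bit num → Pre_flip_bit num → Spec_flip_bit num (flip_bit num)

-- ===== LEMMAS AND PROOFS =====

-- bit-level bridges (Int ops on a Nat cast)
theorem land_one_cast (m : Nat) : Int.land (m : Int) 1 = ((m % 2 : Nat) : Int) := by
  show Int.land (Int.ofNat m) (Int.ofNat 1) = _
  simp [Int.land, Nat.and_one_is_mod]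

theorem land_two_cast (m : Nat) : Int.land (m : Int) 2 = ((m &&& 2 : Nat) : Int) := by
  show Int.land (Int.ofNat m) (Int.ofNat 2) = _
  simp [Int.land]

theorem and_two_eq_zero (m : Nat) : (m &&& 2) = 0 ↔ (m / 2) % 2 = 0 := by
  have h2 : (2:Nat) = 2^1 := rfl
  have ht : m.testBit 1 = ((m/2) % 2 == 1) := by
    simp [Nat.testBit, Nat.shiftRight_one]
  rw [h2, Nat.and_two_pow]
  rcases h : m.testBit 1 <;> rw [h] at ht <;> simp_all

theorem shr_one_cast (m : Nat) : ((m : Int) >>> (1:Int)) = ((m / 2 : Nat) : Int) := by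
  have h : ((1:Int)) = ((1:Nat) : Int) := rfl
  rw [h, Int.shiftRight_natCast]
  simp [Nat.shiftRight_one]

theorem not_eq_zero_iff (n : Int) : (~~~n = 0) ↔ n = -1 := by
  show Int.not n = 0 ↔ _
  unfold Int.not
  cases n
  · simp [Int.negSucc_eq]; omega
  · simp [Int.negSucc_eq]

-- A's loop at the Nat level
def AV (m : Nat) (c p M : Int) : Int :=
  if m = 0 then M
  else if m % 2 = 1 then AV (m / 2) (c + 1) p (max (p + (c + 1) + 1) M)
  else
    let p' : Int := if (m / 2) % 2 = 0 then 0 else c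
    AV (m / 2) 0 p' (max (p' + 1) M)
termination_by m
decreasing_by all_goals omega

-- A's loop with the running max pulled out
def W (m : Nat) (c p : Int) : Int :=
  if m = 0 then 1
  else if m % 2 = 1 then max (p + c + 2) (W (m / 2) (c + 1) p)
  else
    let p' : Int := if (m / 2) % 2 = 0 then 0 else c
    max (p' + 1) (W (m / 2) 0 p')
termination_by m
decreasing_by all_goals omega

-- run list of a Nat, built LSB-first by pushing one bit at a time
def consRun (b : Int) : List (Int × Int) → List (Int × Int)
  | [] => [(b, 1)]
  | (b0, l) :: r => if b0 = b then (b, l + 1) :: r else (b, 1) :: (b0, l) :: r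

def RV (m : Nat) : List (Int × Int) :=
  if m = 0 then [] else consRun ((m % 2 : Nat) : Int) (RV (m / 2))
termination_by m
decreasing_by all_goals omega

-- the combined "future best" value on a run list, tracking A's (curr, prev) state
def V : Int → Int → List (Int × Int) → Int
  | _, _, [] => 1
  | p, c, (b, l) :: r =>
    if b = 1 then
      if l ≤ 1 then max (p + c + 2) (V p (c + 1) r)
      else max (p + c + 2) (V p (c + 1) ((b, l - 1) :: r))
    else
      if l ≤ 1 then
        let p' : Int := if r ≠ [] then c else 0
        max (p' + 1) (V p' 0 r)
      else max (0 + 1) (V 0 0 ((b, l - 1) :: r))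
termination_by _ _ r => (r.length, match r with | [] => 0 | (_, l) :: _ => l.toNat)
decreasing_by
  all_goals simp_wf
  · left; omega
  · right; omega
  · left; omega
  · right; omega

-- well-formed run lists: lengths ≥ 1, bits in {0,1}, alternating, last run is a 1-run
def WFr : List (Int × Int) → Prop
  | [] => True
  | (b, l) :: r =>
    1 ≤ l ∧ (b = 0 ∨ b = 1) ∧
    (match r with | [] => b = 1 | (b', _) :: _ => b' = 1 - b) ∧ WFr r

def runLen (m : Nat) : Nat :=
  if m = 0 then 0 else if (m / 2) % 2 = m % 2 then runLen (m / 2) + 1 else 1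
termination_by m
decreasing_by all_goals omega

def dropRun (m : Nat) : Nat :=
  if m = 0 then 0 else if (m / 2) % 2 = m % 2 then dropRun (m / 2) else m / 2
termination_by m
decreasing_by all_goals omega

theorem runLen_ge_one (m : Nat) (hm : m ≠ 0) : 1 ≤ runLen m := by
  rw [runLen, if_neg hm]; split <;> omega

theorem dropRun_le (m : Nat) : dropRun m ≤ m / 2 := by
  induction m using Nat.strong_induction_on with
  | _ m ih =>
    rw [dropRun]
    split
    · omega
    · split
      · exact le_trans (ih (m / 2) (by omega)) (by omega)
      · omega

theorem RV_cons (m : Nat) (hm : m ≠ 0) :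
    RV m = (((m % 2 : Nat) : Int), ((runLen m : Nat) : Int)) :: RV (dropRun m) := by
  induction m using Nat.strong_induction_on with
  | _ m ih =>
    rw [RV, if_neg hm, runLen, if_neg hm, dropRun, if_neg hm]
    by_cases h2 : m / 2 = 0
    · have hb : m % 2 = 1 := by omega
      rw [h2]
      have h0 : (0 / 2) % 2 = 0 % 2 := by norm_num
      simp [RV, consRun, hb]
    · rw [ih (m / 2) (by omega) h2]
      by_cases he : (m / 2) % 2 = m % 2
      · rw [if_pos he, if_pos he]
        have hc : ((m / 2 % 2 : Nat) : Int) = ((m % 2 : Nat) : Int) := by exact_mod_cast he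
        simp only [consRun]
        rw [if_pos hc]
        push_cast
        ring_nf
      · rw [if_neg he, if_neg he]
        have hc : ¬ (((m / 2 % 2 : Nat) : Int) = ((m % 2 : Nat) : Int)) := by
          exact_mod_cast he
        simp only [consRun]
        rw [if_neg hc, ← ih (m / 2) (by omega) h2]
        norm_num

-- ---- fuel elimination ----
theorem flip_bit_go_eq_AV (fuel : Nat) :
    ∀ (m : Nat) (c p M : Int), m + 1 ≤ fuel → flip_bit_go fuel (m : Int) c p M = AV m c p M := by
  induction fuel with
  | zero => intro m c p M h; omega
  | succ fuel ih =>
    intro m c p M h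
    rw [flip_bit_go, AV]
    by_cases hm : m = 0
    · subst hm; simp
    · rw [if_neg (by exact_mod_cast hm), if_neg hm]
      rw [land_one_cast, land_two_cast, shr_one_cast]
      have hfuel : m / 2 + 1 ≤ fuel := by omega
      by_cases hb : m % 2 = 1
      · rw [if_pos hb, if_pos (by exact_mod_cast hb)]
        exact ih (m / 2) (c + 1) p _ hfuel
      · rw [if_neg hb, if_neg (by exact_mod_cast hb)]
        have h20 : (((m &&& 2 : Nat) : Int) = 0) ↔ ((m / 2) % 2 = 0) := by
          rw [← and_two_eq_zero]; exact_mod_cast Iff.rfl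
        by_cases hz : (m / 2) % 2 = 0
        · rw [if_pos hz, if_pos (h20.mpr hz)]
          show flip_bit_go fuel ((m / 2 : Nat) : Int) 0 0 (max (0 + 0 + 1) M)
              = AV (m / 2) 0 0 (max (0 + 1) M)
          norm_num
          exact ih (m / 2) 0 0 _ hfuel
        · rw [if_neg hz, if_neg (fun hc => hz (h20.mp hc))]
          show flip_bit_go fuel ((m / 2 : Nat) : Int) 0 c (max (c + 0 + 1) M)
              = AV (m / 2) 0 c (max (c + 1) M)
          rw [show c + 0 + 1 = c + 1 from by ring]
          exact ih (m / 2) 0 c _ hfuel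

theorem runChunk_zero (fuel : Nat) (b l : Int) : runChunk fuel 0 b l = (l, 0) := by
  cases fuel <;> simp [runChunk]

theorem runChunk_run (fuel : Nat) :
    ∀ (m : Nat) (l : Int), m ≠ 0 → m + 1 ≤ fuel →
      runChunk fuel (m : Int) ((m % 2 : Nat) : Int) l
        = (l + ((runLen m : Nat) : Int), ((dropRun m : Nat) : Int)) := by
  induction fuel with
  | zero => intro m l hm h; omega
  | succ fuel ih =>
    intro m l hm h
    rw [runChunk, if_pos ⟨by exact_mod_cast hm, land_one_cast m⟩, shr_one_cast]
    rw [runLen, if_neg hm, dropRun, if_neg hm]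
    by_cases h2 : m / 2 = 0
    · have hb : m % 2 = 1 := by omega
      have he : ¬ ((m / 2) % 2 = m % 2) := by omega
      rw [if_neg he, if_neg he, h2]
      push_cast
      rw [runChunk_zero]
    · by_cases he : (m / 2) % 2 = m % 2
      · rw [if_pos he, if_pos he]
        have := ih (m / 2) (l + 1) h2 (by omega)
        rw [he] at this
        rw [this]
        simp only [Prod.mk.injEq, and_true]
        push_cast
        omega
      · rw [if_neg he, if_neg he]
        have hfuel : fuel ≠ 0 := by omega
        obtain ⟨f, rfl⟩ := Nat.exists_eq_succ_of_ne_zero hfuel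
        rw [runChunk]
        have hcond : ¬ (((m / 2 : Nat) : Int) ≠ 0 ∧
            Int.land ((m / 2 : Nat) : Int) 1 = ((m % 2 : Nat) : Int)) := by
          rintro ⟨-, hl⟩
          rw [land_one_cast] at hl
          exact he (by exact_mod_cast hl)
        rw [if_neg hcond]
        simp only [Prod.mk.injEq, and_true]
        push_cast
        omega

theorem buildRuns_eq_RV (fuel : Nat) :
    ∀ (m : Nat), m + 1 ≤ fuel → buildRuns fuel (m : Int) = RV m := by
  induction fuel with
  | zero => intro m h; omega
  | succ fuel ih =>
    intro m h
    by_cases hm : m = 0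
    · subst hm; rw [buildRuns]; simp [RV]
    · rw [buildRuns, if_neg (by exact_mod_cast hm), RV_cons m hm]
      have htn : ((m : Int)).toNat = m := by omega
      show (Int.land (m : Int) 1,
            (runChunk (((m : Int)).toNat + 1) (m : Int) (Int.land (m : Int) 1) 0).1)
          :: buildRuns fuel (runChunk (((m : Int)).toNat + 1) (m : Int) (Int.land (m : Int) 1) 0).2
          = _
      rw [land_one_cast, htn, runChunk_run (m + 1) m 0 hm (le_refl _)]
      have hd : dropRun m + 1 ≤ fuel := by
        have := dropRun_le m
        omega
      rw [ih (dropRun m) hd]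
      norm_num

-- ---- AV = max M (W) ----
theorem AV_eq_max_W (m : Nat) :
    ∀ (c p M : Int), 0 ≤ c → 0 ≤ p → 1 ≤ M → AV m c p M = max M (W m c p) := by
  induction m using Nat.strong_induction_on with
  | _ m ih =>
    intro c p M hc hp hM
    rw [AV, W]
    by_cases hm : m = 0
    · rw [if_pos hm, if_pos hm]; omega
    · rw [if_neg hm, if_neg hm]
      by_cases hb : m % 2 = 1
      · rw [if_pos hb, if_pos hb]
        rw [ih (m / 2) (by omega) (c + 1) p _ (by omega) hp (by omega)]
        have h1 : p + (c + 1) + 1 = p + c + 2 := by ring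
        rw [h1]
        generalize W (m / 2) (c + 1) p = w
        omega
      · rw [if_neg hb, if_neg hb]
        by_cases hz : (m / 2) % 2 = 0
        · rw [if_pos hz]
          show AV (m / 2) 0 0 (max (0 + 1) M) = max M (max (0 + 1) (W (m / 2) 0 0))
          rw [ih (m / 2) (by omega) 0 0 _ le_rfl le_rfl (by omega)]
          generalize W (m / 2) 0 0 = w
          omega
        · rw [if_neg hz]
          show AV (m / 2) 0 c (max (c + 1) M) = max M (max (c + 1) (W (m / 2) 0 c))
          rw [ih (m / 2) (by omega) 0 c _ le_rfl hc (by omega)]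
          generalize W (m / 2) 0 c = w
          omega

-- ---- W = V on the run list ----
theorem RV_zero : RV 0 = [] := by rw [RV]; simp

theorem consRun_same (b l : Int) (r : List (Int × Int)) :
    consRun b ((b, l) :: r) = (b, l + 1) :: r := by simp [consRun]

theorem consRun_diff (b b0 l : Int) (r : List (Int × Int)) (h : b0 ≠ b) :
    consRun b ((b0, l) :: r) = (b, 1) :: (b0, l) :: r := by simp [consRun, h]

theorem V_nil (p c : Int) : V p c [] = 1 := by rw [V]

theorem V_one_short (p c l : Int) (r : List (Int × Int)) (h : l ≤ 1) :
    V p c ((1, l) :: r) = max (p + c + 2) (V p (c + 1) r) := by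
  conv_lhs => rw [V]
  rw [if_pos rfl, if_pos h]

theorem V_one_long (p c l : Int) (r : List (Int × Int)) (h : ¬ l ≤ 1) :
    V p c ((1, l) :: r) = max (p + c + 2) (V p (c + 1) ((1, l - 1) :: r)) := by
  conv_lhs => rw [V]
  rw [if_pos rfl, if_neg h]

theorem V_zero_short (p c l : Int) (r : List (Int × Int)) (h : l ≤ 1) :
    V p c ((0, l) :: r)
      = max ((if r ≠ [] then c else 0) + 1) (V (if r ≠ [] then c else 0) 0 r) := by
  conv_lhs => rw [V]
  rw [if_neg (by norm_num : ¬ ((0:Int) = 1)), if_pos h]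

theorem V_zero_long (p c l : Int) (r : List (Int × Int)) (h : ¬ l ≤ 1) :
    V p c ((0, l) :: r) = max (0 + 1) (V 0 0 ((0, l - 1) :: r)) := by
  conv_lhs => rw [V]
  rw [if_neg (by norm_num : ¬ ((0:Int) = 1)), if_neg h]

theorem W_eq_V (m : Nat) : ∀ (c p : Int), W m c p = V p c (RV m) := by
  induction m using Nat.strong_induction_on with
  | _ m ih =>
    intro c p
    by_cases hm : m = 0
    · subst hm
      rw [W, RV_zero, V_nil]
      simp
    · rw [W, if_neg hm, RV, if_neg hm]
      by_cases hb : m % 2 = 1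
      · rw [if_pos hb, hb, Nat.cast_one]
        by_cases h2 : m / 2 = 0
        · rw [h2, RV_zero]
          show max (p + c + 2) (W 0 (c + 1) p) = V p c (consRun 1 [])
          rw [W, if_pos rfl]
          show _ = V p c [(1, 1)]
          rw [V_one_short p c 1 [] le_rfl, V_nil]
        · have hcons := RV_cons (m / 2) h2
          have hlen := runLen_ge_one (m / 2) h2
          rw [ih (m / 2) (by omega) (c + 1) p, hcons]
          by_cases hb2 : (m / 2) % 2 = 1
          · rw [hb2, Nat.cast_one, consRun_same]
            have hgt : ¬ (((runLen (m / 2) : Nat) : Int) + 1 ≤ 1) := by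
              omega
            rw [V_one_long p c _ _ hgt]
            have hsub : ((runLen (m / 2) : Nat) : Int) + 1 - 1
                = ((runLen (m / 2) : Nat) : Int) := by ring
            rw [hsub]
          · have hb20 : (m / 2) % 2 = 0 := by omega
            rw [hb20, Nat.cast_zero,
                consRun_diff 1 0 _ _ (by norm_num : (0:Int) ≠ 1),
                V_one_short p c 1 _ le_rfl]
      · have hb0 : m % 2 = 0 := by omega
        rw [if_neg hb, hb0, Nat.cast_zero]
        have h2 : m / 2 ≠ 0 := by omega
        have hcons := RV_cons (m / 2) h2
        have hlen := runLen_ge_one (m / 2) h2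
        by_cases hz : (m / 2) % 2 = 0
        · rw [if_pos hz]
          show max (0 + 1) (W (m / 2) 0 0) = V p c (consRun 0 (RV (m / 2)))
          rw [ih (m / 2) (by omega) 0 0, hcons, hz, Nat.cast_zero, consRun_same]
          have hgt : ¬ (((runLen (m / 2) : Nat) : Int) + 1 ≤ 1) := by
            omega
          rw [V_zero_long p c _ _ hgt]
          have hsub : ((runLen (m / 2) : Nat) : Int) + 1 - 1
              = ((runLen (m / 2) : Nat) : Int) := by ring
          rw [hsub]
        · have hb21 : (m / 2) % 2 = 1 := by omega
          rw [if_neg hz]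
          show max (c + 1) (W (m / 2) 0 c) = V p c (consRun 0 (RV (m / 2)))
          rw [ih (m / 2) (by omega) 0 c, hcons, hb21, Nat.cast_one,
              consRun_diff 0 1 _ _ (by norm_num : (1:Int) ≠ 0),
              V_zero_short p c 1 _ le_rfl]
          simp

-- ---- V vs bestRuns ----
theorem bestRuns_nil : bestRuns [] = 1 := rfl

theorem bestRuns_zero (b l : Int) (rest : List (Int × Int)) (h : b ≠ 1) :
    bestRuns ((b, l) :: rest) = bestRuns rest := by
  rcases rest with _ | ⟨⟨b1, l1⟩, _ | ⟨⟨b2, l2⟩, t⟩⟩ <;> simp [bestRuns, h]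

theorem bestRuns_one_nil (l : Int) : bestRuns [(1, l)] = max 1 (l + 1) := rfl

theorem bestRuns_one_one (l : Int) (x : Int × Int) :
    bestRuns [(1, l), x] = max (bestRuns [x]) (l + 1) := by
  obtain ⟨b1, l1⟩ := x; rfl

theorem bestRuns_one_cons2 (l b1 l1 b2 l2 : Int) (t : List (Int × Int)) :
    bestRuns ((1, l) :: (b1, l1) :: (b2, l2) :: t)
      = if b1 = 0 ∧ l1 = 1 ∧ b2 = 1
        then max (max (bestRuns ((b1, l1) :: (b2, l2) :: t)) (l + 1)) (l + l2 + 1)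
        else max (bestRuns ((b1, l1) :: (b2, l2) :: t)) (l + 1) := rfl

theorem bestRuns_ge_one (r : List (Int × Int)) : 1 ≤ bestRuns r := by
  induction r with
  | nil => norm_num [bestRuns]
  | cons hd tl ih =>
    obtain ⟨b, l⟩ := hd
    by_cases hb : b = 1
    · subst hb
      rcases tl with _ | ⟨⟨b1, l1⟩, _ | ⟨⟨b2, l2⟩, t⟩⟩
      · rw [bestRuns_one_nil]; omega
      · rw [bestRuns_one_one]; omega
      · rw [bestRuns_one_cons2]; split_ifs <;> omega
    · rw [bestRuns_zero b l tl hb]; exact ih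

theorem bestRuns_one_ge (l : Int) (t : List (Int × Int)) :
    l + 1 ≤ bestRuns ((1, l) :: t) := by
  rcases t with _ | ⟨⟨b1, l1⟩, _ | ⟨⟨b2, l2⟩, t⟩⟩
  · rw [bestRuns_one_nil]; omega
  · rw [bestRuns_one_one]
    have := bestRuns_ge_one [(b1, l1)]
    omega
  · rw [bestRuns_one_cons2]
    have := bestRuns_ge_one ((b1, l1) :: (b2, l2) :: t)
    split_ifs <;> omega

theorem V_zero_run (l : Int) (r : List (Int × Int)) (hl : 1 ≤ l) :
    V 0 0 ((0, l) :: r) = max 1 (V 0 0 r) := by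
  have H : ∀ (n : Nat) (l : Int), l.toNat = n → 1 ≤ l →
      V 0 0 ((0, l) :: r) = max 1 (V 0 0 r) := by
    intro n
    induction n using Nat.strong_induction_on with
    | _ n ihn =>
      intro l hln hl1
      by_cases h1 : l ≤ 1
      · have : l = 1 := by omega
        subst this
        rw [V_zero_short 0 0 1 r le_rfl]
        by_cases hr : r = [] <;> simp [hr]
      · rw [V_zero_long 0 0 l r h1,
            ihn (l - 1).toNat (by omega) (l - 1) rfl (by omega)]
        generalize V 0 0 r = w
        omega
  exact H l.toNat l rfl hl

theorem V_ones (k p c : Int) (r : List (Int × Int)) (hk : 1 ≤ k) :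
    V p c ((1, k) :: r) = max (p + c + k + 1) (V p (c + k) r) := by
  have H : ∀ (n : Nat) (k c : Int), k.toNat = n → 1 ≤ k →
      V p c ((1, k) :: r) = max (p + c + k + 1) (V p (c + k) r) := by
    intro n
    induction n using Nat.strong_induction_on with
    | _ n ihn =>
      intro k c hkn hk1
      by_cases h1 : k ≤ 1
      · have hkeq : k = 1 := by omega
        subst hkeq
        rw [V_one_short p c 1 r le_rfl]
        have h2 : p + c + 1 + 1 = p + c + 2 := by ring
        rw [h2]
      · rw [V_one_long p c k r h1,
            ihn (k - 1).toNat (by omega) (k - 1) (c + 1) rfl (by omega)]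
        have h2 : c + 1 + (k - 1) = c + k := by ring
        rw [h2]
        generalize V p (c + k) r = w
        omega
  exact H k.toNat k c rfl hk

theorem WFr_cons_iff (b l : Int) (r : List (Int × Int)) :
    WFr ((b, l) :: r) ↔ 1 ≤ l ∧ (b = 0 ∨ b = 1) ∧
      (match r with | [] => b = 1 | (b', _) :: _ => b' = 1 - b) ∧ WFr r := Iff.rfl

theorem V_eq_bestRuns_aux (n : Nat) :
    ∀ (r : List (Int × Int)), r.length = n → WFr r →
      ∀ (p k : Int) (rest : List (Int × Int)), 0 ≤ p → r = (1, k) :: rest →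
        V p 0 r = max (bestRuns r) (p + k + 1) := by
  induction n using Nat.strong_induction_on with
  | _ n ihn =>
    rintro r hlen hwf p k rest hp rfl
    obtain ⟨hk, -, hshape, hwrest⟩ := (WFr_cons_iff 1 k rest).mp hwf
    rw [V_ones k p 0 rest hk]
    rcases rest with _ | ⟨⟨b1, l1⟩, rest2⟩
    · rw [V_nil, bestRuns_one_nil]
      omega
    · have hb1 : b1 = 0 := by omega
      subst hb1
      obtain ⟨hl1, -, hshape2, hwrest2⟩ := (WFr_cons_iff 0 l1 rest2).mp hwrest
      rcases rest2 with _ | ⟨⟨b2, l2⟩, rest3⟩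
      · exact absurd hshape2 (by norm_num)
      · have hb2 : b2 = 1 := by omega
        subst hb2
        have hr2wf : WFr ((1, l2) :: rest3) := hwrest2
        obtain ⟨hl2, -, -, -⟩ := (WFr_cons_iff 1 l2 rest3).mp hwrest2
        have hbge := bestRuns_one_ge l2 rest3
        have hbg1 := bestRuns_ge_one ((1, l2) :: rest3)
        by_cases h11 : l1 = 1
        · subst h11
          rw [V_zero_short p (0 + k) 1 ((1, l2) :: rest3) le_rfl,
              if_pos (by simp)]
          rw [ihn ((1, l2) :: rest3).length (by simp only [List.length_cons] at hlen ⊢; omega)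
                ((1, l2) :: rest3) rfl hr2wf (0 + k) l2 rest3 (by omega) rfl]
          rw [bestRuns_one_cons2, if_pos ⟨rfl, rfl, rfl⟩,
              bestRuns_zero 0 1 ((1, l2) :: rest3) (by norm_num)]
          generalize bestRuns ((1, l2) :: rest3) = w at hbge hbg1 ⊢
          omega
        · have h1gt : ¬ (l1 ≤ 1) := by omega
          rw [V_zero_long p (0 + k) l1 ((1, l2) :: rest3) h1gt,
              V_zero_run (l1 - 1) ((1, l2) :: rest3) (by omega)]
          rw [ihn ((1, l2) :: rest3).length (by simp only [List.length_cons] at hlen ⊢; omega)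
                ((1, l2) :: rest3) rfl hr2wf 0 l2 rest3 le_rfl rfl]
          rw [bestRuns_one_cons2,
              if_neg (by intro hc; exact h11 hc.2.1),
              bestRuns_zero 0 l1 ((1, l2) :: rest3) (by norm_num)]
          generalize bestRuns ((1, l2) :: rest3) = w at hbge hbg1 ⊢
          omega

theorem RV_ne_nil (m : Nat) (hm : m ≠ 0) : RV m ≠ [] := by
  rw [RV_cons m hm]; simp

theorem WFr_consRun (b : Int) (r : List (Int × Int)) (hb : b = 0 ∨ b = 1)
    (hr : WFr r) (hnil : r = [] → b = 1) : WFr (consRun b r) := by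
  rcases r with _ | ⟨⟨b0, l⟩, t⟩
  · show WFr [(b, 1)]
    exact ⟨le_rfl, hb, hnil rfl, trivial⟩
  · obtain ⟨hl, hb0, hsh, hwt⟩ := (WFr_cons_iff b0 l t).mp hr
    by_cases he : b0 = b
    · subst he
      rw [consRun_same]
      exact (WFr_cons_iff b0 (l + 1) t).mpr ⟨by omega, hb0, hsh, hwt⟩
    · rw [consRun_diff b b0 l t he]
      refine (WFr_cons_iff b 1 ((b0, l) :: t)).mpr ⟨le_rfl, hb, ?_, hr⟩
      show b0 = 1 - b
      omega

theorem WFr_RV (m : Nat) : WFr (RV m) := by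
  induction m using Nat.strong_induction_on with
  | _ m ih =>
    by_cases hm : m = 0
    · subst hm; rw [RV_zero]; trivial
    · rw [RV, if_neg hm]
      refine WFr_consRun _ _ (by omega) (ih (m / 2) (by omega)) ?_
      intro hnil
      by_cases h2 : m / 2 = 0
      · have : m % 2 = 1 := by omega
        rw [this]; norm_num
      · exact absurd hnil (RV_ne_nil (m / 2) h2)

theorem max_one_V_eq_bestRuns (m : Nat) : max 1 (V 0 0 (RV m)) = bestRuns (RV m) := by
  by_cases hm : m = 0
  · subst hm; rw [RV_zero, V_nil, bestRuns_nil]; norm_num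
  · have hwf := WFr_RV m
    have hcons := RV_cons m hm
    have hlen := runLen_ge_one m hm
    by_cases hb : m % 2 = 1
    · rw [hcons, hb, Nat.cast_one] at hwf ⊢
      rw [V_eq_bestRuns_aux _ _ rfl hwf 0 _ _ le_rfl rfl]
      have hge := bestRuns_one_ge ((runLen m : Nat) : Int) (RV (dropRun m))
      have hge1 := bestRuns_ge_one (((1:Int), ((runLen m : Nat) : Int)) :: RV (dropRun m))
      generalize bestRuns (((1:Int), ((runLen m : Nat) : Int)) :: RV (dropRun m)) = w at hge hge1 ⊢
      omega
    · have hb0 : m % 2 = 0 := by omega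
      rw [hcons, hb0, Nat.cast_zero] at hwf ⊢
      obtain ⟨hl, -, hsh, hwr⟩ :=
        (WFr_cons_iff 0 ((runLen m : Nat) : Int) (RV (dropRun m))).mp hwf
      rcases hr : RV (dropRun m) with _ | ⟨⟨b2, l2⟩, t⟩
      · rw [hr] at hsh; exact absurd hsh (by norm_num)
      · rw [hr] at hsh hwr
        have hb2 : b2 = 1 := by omega
        subst hb2
        rw [V_zero_run _ _ (by exact_mod_cast hlen)]
        rw [V_eq_bestRuns_aux _ _ rfl hwr 0 l2 t le_rfl rfl]
        rw [bestRuns_zero 0 _ _ (by norm_num)]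
        have hge := bestRuns_one_ge l2 t
        have hge1 := bestRuns_ge_one (((1:Int), l2) :: t)
        generalize bestRuns (((1:Int), l2) :: t) = w at hge hge1 ⊢
        omega

-- ===== VERDICT (by name: the statement is the Claim_ definition above) =====
theorem flip_bit_spec : Claim_equal_flip_bit := by
  intro num _ hpre
  unfold Spec_flip_bit flip_bit flip_bit_alt
  rcases hpre with h | h
  · have hnot : ¬ (~~~num = 0) := by
      rw [not_eq_zero_iff]; omega
    rw [if_neg hnot, if_neg hnot]
    obtain ⟨m, rfl⟩ : ∃ m : Nat, num = (m : Int) := ⟨num.toNat, by omega⟩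
    have htn : (m : Int).toNat = m := by omega
    rw [htn, flip_bit_go_eq_AV (m + 1) m 0 0 1 (le_refl _),
        AV_eq_max_W m 0 0 1 (by omega) (by omega) (by omega),
        W_eq_V m 0 0, max_one_V_eq_bestRuns m, buildRuns_eq_RV (m + 1) m (le_refl _)]
  · subst h; decide
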